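-- pv_equiv track=rewrite | github.com/benton-tripp/nc-parks | data-pipeline/sources/osm.py | _map_amenities
-- ===== SOURCE A (Python) =====
-- _TAG_AMENITY_MAP = {
--     "toilets":          "restrooms",
--     "drinking_water":   "drinking_water",
--     "covered":          "shaded_areas",
--     "shade":            "shaded_areas",
--     "lit":              "lighting",
--     "wheelchair":       "ada_accessible",
--     "dog":              "dog_park",
--     "fence":            "fenced_playground",
--     "swimming_pool":    "swimming_pool",
--     "fishing":          "fishing",
--     "shelter":          "picnic_shelter",
--     "bench":            "picnic_tables",
--     "bbq":              "bbq_grill",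
--     "camping":          "camping",
-- }
--
-- _PLAYGROUND_SUB_TAGS = {
--     "playground:swing":     "swings",
--     "playground:swings":    "swings",
--     "playground:slide":     "slides",
--     "playground:sandpit":   "sandbox",
--     "playground:seesaw":    "seesaw",
--     "playground:climbing":  "climbing",
--     "playground:zipwire":   "zip_line",
--     "playground:roundabout": "merry_go_round",
--     "playground:spring":    "spring_rider",
--     "playground:basketswing": "swings",
--     "playground:structure": "play_structure",
-- }
--
-- _SPORT_MAP = {
--     "basketball":       "basketball_courts",
--     "tennis":           "tennis_courts",
--     "skateboard":       "skate_park",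
--     "disc_golf":        "disc_golf",
--     "baseball":         "ball_fields",
--     "softball":         "ball_fields",
--     "soccer":           "multipurpose_field",
--     "volleyball":       "sand_volleyball",
--     "bmx":              "bmx_track",
--     "equestrian":       "equestrian",
--     "boules":           "bocce",
--     "handball":         "handball",
--     "horseshoes":       "horseshoe",
--     "swimming":         "swimming_pool",
--     "multi":            "multipurpose_field",
-- }
--
-- def _map_amenities(tags: dict) -> dict[str, bool]:
--     """Extract normalized amenities from OSM tags."""
--     amenities: dict[str, bool] = {}
--
--     # leisure type itself tells us something
--     leisure = tags.get("leisure", "")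
--     if leisure == "playground":
--         amenities["playground"] = True
--     elif leisure == "dog_park":
--         amenities["dog_park"] = True
--
--     # Direct tag checks
--     for tag_key, amenity_key in _TAG_AMENITY_MAP.items():
--         val = tags.get(tag_key, "")
--         if val and val.lower() in ("yes", "true", "1"):
--             amenities[amenity_key] = True
--
--     # Playground sub-tags
--     for tag_key, amenity_key in _PLAYGROUND_SUB_TAGS.items():
--         val = tags.get(tag_key, "")
--         if val and val.lower() in ("yes", "true", "1"):
--             amenities[amenity_key] = True
--
--     # Sport tags (can be semicolon-separated: "basketball;tennis")
--     sport = tags.get("sport", "")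
--     for s in sport.split(";"):
--         s = s.strip().lower()
--         if s in _SPORT_MAP:
--             amenities[_SPORT_MAP[s]] = True
--
--     # Surface / path → walking trails
--     if tags.get("highway") in ("path", "footway", "cycleway"):
--         amenities["walking_trails"] = True
--     if tags.get("surface") and leisure == "park":
--         amenities["walking_trails"] = True
--
--     # Parking
--     if tags.get("parking") or tags.get("amenity") == "parking":
--         amenities["parking"] = True
--
--     return amenities
-- ===== SOURCE B (Python) =====
-- _TAG_AMENITY_MAP = {
--     "toilets":          "restrooms",
--     "drinking_water":   "drinking_water",
--     "covered":          "shaded_areas",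
--     "shade":            "shaded_areas",
--     "lit":              "lighting",
--     "wheelchair":       "ada_accessible",
--     "dog":              "dog_park",
--     "fence":            "fenced_playground",
--     "swimming_pool":    "swimming_pool",
--     "fishing":          "fishing",
--     "shelter":          "picnic_shelter",
--     "bench":            "picnic_tables",
--     "bbq":              "bbq_grill",
--     "camping":          "camping",
-- }
--
-- _PLAYGROUND_SUB_TAGS = {
--     "playground:swing":     "swings",
--     "playground:swings":    "swings",
--     "playground:slide":     "slides",
--     "playground:sandpit":   "sandbox",
--     "playground:seesaw":    "seesaw",
--     "playground:climbing":  "climbing",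
--     "playground:zipwire":   "zip_line",
--     "playground:roundabout": "merry_go_round",
--     "playground:spring":    "spring_rider",
--     "playground:basketswing": "swings",
--     "playground:structure": "play_structure",
-- }
--
-- _SPORT_MAP = {
--     "basketball":       "basketball_courts",
--     "tennis":           "tennis_courts",
--     "skateboard":       "skate_park",
--     "disc_golf":        "disc_golf",
--     "baseball":         "ball_fields",
--     "softball":         "ball_fields",
--     "soccer":           "multipurpose_field",
--     "volleyball":       "sand_volleyball",
--     "bmx":              "bmx_track",
--     "equestrian":       "equestrian",
--     "boules":           "bocce",
--     "handball":         "handball",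
--     "horseshoes":       "horseshoe",
--     "swimming":         "swimming_pool",
--     "multi":            "multipurpose_field",
-- }
--
-- _COMBINED_MAP = {**_TAG_AMENITY_MAP, **_PLAYGROUND_SUB_TAGS}
-- _TRUTHY = ("yes", "true", "1")
-- _SPECIAL_KEYS = ("leisure", "sport", "highway", "surface", "parking", "amenity")
--
--
-- def _map_amenities(tags: dict) -> dict[str, bool]:
--     """Single pass over tags.items() classifying each key (truthy boolean tags via
--     one combined map, plus the six special keys), then emit amenity names in
--     canonical order and build the result dict with dict.fromkeys."""
--     truthy_keys = set()
--     special = {}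
--     for key, val in tags.items():
--         if val and val.lower() in _TRUTHY and key in _COMBINED_MAP:
--             truthy_keys.add(key)
--         if key in _SPECIAL_KEYS:
--             special[key] = val
--
--     leisure = special.get("leisure", "")
--     names = []
--     if leisure == "playground":
--         names.append("playground")
--     elif leisure == "dog_park":
--         names.append("dog_park")
--     names += [amen for key, amen in _COMBINED_MAP.items() if key in truthy_keys]
--     tokens = [s.strip().lower() for s in special.get("sport", "").split(";")]
--     names += [_SPORT_MAP[s] for s in tokens if s in _SPORT_MAP]
--     if special.get("highway") in ("path", "footway", "cycleway"):
--         names.append("walking_trails")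
--     if special.get("surface") and leisure == "park":
--         names.append("walking_trails")
--     if special.get("parking") or special.get("amenity") == "parking":
--         names.append("parking")
--     return dict.fromkeys(names, True)
-- ===== Notes on version B (the rewrite author's own statement) =====
-- stated objective: alternative
-- what changed: B makes a single pass over tags.items(), classifying each key against one combined boolean-tag map (collecting the set of truthy keys and the six special values), then emits amenity names in canonical order and builds the result dict with dict.fromkeys, instead of A's per-map-entry tags.get loops that mutate the dict as they go.
import Mathlib
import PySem

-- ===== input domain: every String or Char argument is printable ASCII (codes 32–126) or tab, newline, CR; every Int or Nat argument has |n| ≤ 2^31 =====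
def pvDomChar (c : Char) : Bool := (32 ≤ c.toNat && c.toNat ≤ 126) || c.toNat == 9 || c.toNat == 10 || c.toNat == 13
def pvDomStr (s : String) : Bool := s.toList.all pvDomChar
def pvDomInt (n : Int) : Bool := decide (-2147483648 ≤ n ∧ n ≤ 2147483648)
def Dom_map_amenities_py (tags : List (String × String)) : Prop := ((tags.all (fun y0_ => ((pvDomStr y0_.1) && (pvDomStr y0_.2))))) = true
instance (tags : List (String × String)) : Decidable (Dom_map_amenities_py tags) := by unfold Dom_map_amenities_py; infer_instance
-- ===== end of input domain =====

-- B replaces A's per-map-entry tags.get loops by one pass over tags.items() (classifying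
-- each key against a combined map and collecting the special keys), then emits amenity
-- names in canonical order and builds the dict with dict.fromkeys (objective: alternative).

-- shared module constants (helpers of both A and B)
def pvTagAmenityMap : List (String × String) :=
  [("toilets","restrooms"),("drinking_water","drinking_water"),("covered","shaded_areas"),
   ("shade","shaded_areas"),("lit","lighting"),("wheelchair","ada_accessible"),("dog","dog_park"),
   ("fence","fenced_playground"),("swimming_pool","swimming_pool"),("fishing","fishing"),
   ("shelter","picnic_shelter"),("bench","picnic_tables"),("bbq","bbq_grill"),("camping","camping")]

def pvPlaygroundSubTags : List (String × String) :=
  [("playground:swing","swings"),("playground:swings","swings"),("playground:slide","slides"),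
   ("playground:sandpit","sandbox"),("playground:seesaw","seesaw"),("playground:climbing","climbing"),
   ("playground:zipwire","zip_line"),("playground:roundabout","merry_go_round"),
   ("playground:spring","spring_rider"),("playground:basketswing","swings"),
   ("playground:structure","play_structure")]

def pvSportMap : PySem.Dict String String := PySem.Dict.ofList
  [("basketball","basketball_courts"),("tennis","tennis_courts"),("skateboard","skate_park"),
   ("disc_golf","disc_golf"),("baseball","ball_fields"),("softball","ball_fields"),
   ("soccer","multipurpose_field"),("volleyball","sand_volleyball"),("bmx","bmx_track"),
   ("equestrian","equestrian"),("boules","bocce"),("handball","handball"),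
   ("horseshoes","horseshoe"),("swimming","swimming_pool"),("multi","multipurpose_field")]

-- ===== PORT A =====
-- 'val and val.lower() in ("yes","true","1")' transliterated as a Bool expression
def map_amenities_py (tags : List (String × String)) : List (String × Bool) :=
  let t : PySem.Dict String String := PySem.Dict.mk tags
  let amenities : PySem.Dict String Bool := PySem.Dict.empty
  let leisure := t.getD "leisure" ""
  let amenities :=
    if leisure == "playground" then amenities.insert "playground" true
    else if leisure == "dog_park" then amenities.insert "dog_park" true
    else amenities
  let amenities := pvTagAmenityMap.foldl (fun d p =>
    let val := t.getD p.1 ""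
    if (val != "") && ["yes","true","1"].contains (PySem.Str.lower val)
    then d.insert p.2 true else d) amenities
  let amenities := pvPlaygroundSubTags.foldl (fun d p =>
    let val := t.getD p.1 ""
    if (val != "") && ["yes","true","1"].contains (PySem.Str.lower val)
    then d.insert p.2 true else d) amenities
  let sport := t.getD "sport" ""
  let amenities := (((PySem.Str.split? sport ";").getD [])).foldl (fun d s0 =>
    let s := PySem.Str.lower (PySem.Str.strip s0)
    if pvSportMap.contains s then d.insert (pvSportMap.getD s "") true else d) amenities
  let amenities :=
    if [some "path", some "footway", some "cycleway"].contains (t.get? "highway")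
    then amenities.insert "walking_trails" true else amenities
  let amenities :=
    if (t.getD "surface" "" != "") && (leisure == "park")
    then amenities.insert "walking_trails" true else amenities
  let amenities :=
    if (t.getD "parking" "" != "") || (t.get? "amenity" == some "parking")
    then amenities.insert "parking" true else amenities
  amenities.items

-- ===== PORT B =====
-- B-side helpers (module constants of Source B and the two independent updates of B's scan loop)
def pvCombinedMap : List (String × String) := pvTagAmenityMap ++ pvPlaygroundSubTags
def pvCombinedDict : PySem.Dict String String := PySem.Dict.mk pvCombinedMap
def pvSpecialKeys : List String := ["leisure", "sport", "highway", "surface", "parking", "amenity"]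

-- 'val and val.lower() in _TRUTHY' of Source B
def pvTruthy (v : String) : Bool :=
  (v != "") && ["yes","true","1"].contains (PySem.Str.lower v)

-- 'if val ... and key in _COMBINED_MAP: truthy_keys.add(key)'
def pvTruthyStep (s : PySem.Set String) (p : String × String) : PySem.Set String :=
  if pvTruthy p.2 && pvCombinedDict.contains p.1 then PySem.Set.add s p.1 else s

-- 'if key in _SPECIAL_KEYS: special[key] = val'
def pvSpecStep (d : PySem.Dict String String) (p : String × String) : PySem.Dict String String :=
  if pvSpecialKeys.contains p.1 then d.insert p.1 p.2 else d

def map_amenities_py_alt (tags : List (String × String)) : List (String × Bool) :=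
  -- single pass over tags.items(): each item updates the truthy-key set and the special dict
  let scan := tags.foldl
    (fun (st : PySem.Set String × PySem.Dict String String) p =>
      (pvTruthyStep st.1 p, pvSpecStep st.2 p))
    ((PySem.Set.empty : PySem.Set String), (PySem.Dict.empty : PySem.Dict String String))
  let truthyKeys := scan.1
  let special := scan.2
  let leisure := special.getD "leisure" ""
  let names : List String :=
    (if leisure == "playground" then ["playground"]
     else if leisure == "dog_park" then ["dog_park"] else [])
    ++ (pvCombinedMap.filter (fun p => truthyKeys.contains p.1)).map (fun p => p.2)
    ++ (let tokens := (((PySem.Str.split? (special.getD "sport" "") ";").getD [])).map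
          (fun s => PySem.Str.lower (PySem.Str.strip s))
        (tokens.filter (fun s => pvSportMap.contains s)).map (fun s => pvSportMap.getD s ""))
    ++ (if [some "path", some "footway", some "cycleway"].contains (special.get? "highway")
        then ["walking_trails"] else [])
    ++ (if (special.getD "surface" "" != "") && (leisure == "park")
        then ["walking_trails"] else [])
    ++ (if (special.getD "parking" "" != "") || (special.get? "amenity" == some "parking")
        then ["parking"] else [])
  -- dict.fromkeys(names, True)
  (PySem.List.dedup names).map (fun a => (a, true))

-- ===== PRECONDITION & SPEC =====
-- Pre_ excludes association lists with duplicate keys: they do not represent any Python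
-- dict (A's parameter is a dict), so first-match reading of them is accidental.
def Pre_map_amenities_py (tags : List (String × String)) : Prop :=
  (tags.map Prod.fst).Nodup
instance (tags : List (String × String)) : Decidable (Pre_map_amenities_py tags) := by
  unfold Pre_map_amenities_py; infer_instance

def pvWitness_map_amenities_py : (List (String × String)) :=
  [("leisure", "playground"), ("shade", "YES"), ("sport", "tennis;bmx"), ("parking", "surface")]

def Spec_map_amenities_py (tags : List (String × String)) (out : List (String × Bool)) : Prop := out = map_amenities_py_alt tags
instance (tags : List (String × String)) (out : List (String × Bool)) : Decidable (Spec_map_amenities_py tags out) := by unfold Spec_map_amenities_py; infer_instance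

-- ===== CLAIM (what is proved, stated in full; the proofs are below) =====
def Claim_equal_map_amenities_py : Prop := ∀ (tags : List (String × String)), Dom_map_amenities_py tags → Pre_map_amenities_py tags → Spec_map_amenities_py tags (map_amenities_py tags)

-- ===== LEMMAS AND PROOFS =====

-- unconditional insert-true step
def pvIns (d : PySem.Dict String Bool) (a : String) : PySem.Dict String Bool := d.insert a true

-- a conditional insert-true fold is the pvIns fold over the filtered, mapped name list
theorem pv_condfold {A : Type} (c : A → Bool) (f : A → String) (l : List A)
    (d : PySem.Dict String Bool) :
    l.foldl (fun d p => if c p then d.insert (f p) true else d) d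
      = ((l.filter c).map f).foldl pvIns d := by
  induction l generalizing d with
  | nil => rfl
  | cons p rest ih =>
    by_cases h : c p = true <;> simp only [List.filter_cons, List.map_cons, List.foldl_cons, h, Bool.false_eq_true,
        if_true, if_false, ih, pvIns]

-- a single conditional insert as a pvIns fold over an if-list
theorem pv_ifins (c : Bool) (a : String) (d : PySem.Dict String Bool) :
    (if c then d.insert a true else d) = (if c then [a] else []).foldl pvIns d := by
  cases c <;> rfl

-- all stored values are true, so getD with default true is constantly true
theorem pv_getD_ins_true (l : List String) (d : PySem.Dict String Bool) (k : String)
    (h : d.getD k true = true) : (l.foldl pvIns d).getD k true = true := by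
  induction l generalizing d with
  | nil => exact h
  | cons a rest ih =>
    refine ih _ ?_
    by_cases hk : k = a
    · subst hk; simp [pvIns]
    · simp [pvIns, PySem.Dict.getD_insert, hk, h]

-- the items of an insert-true fold: dedup of the name list, paired with true
theorem pv_items_fold (l : List String) :
    ((l.foldl pvIns (PySem.Dict.empty : PySem.Dict String Bool)).items)
      = (PySem.List.dedup l).map (fun a => (a, true)) := by
  have hnd : ((l.foldl pvIns (PySem.Dict.empty : PySem.Dict String Bool)).keys).Nodup := by
    simpa [pvIns] using
      PySem.Dict.nodup_keys_foldl_insert l (fun _ _ => true)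
        (PySem.Dict.empty : PySem.Dict String Bool) (by simp)
  have hkeys : (l.foldl pvIns (PySem.Dict.empty : PySem.Dict String Bool)).keys
      = PySem.Set.ofList l := by
    simpa [pvIns] using
      PySem.Dict.keys_foldl_insert l (fun _ _ => true)
        (PySem.Dict.empty : PySem.Dict String Bool)
  rw [PySem.Dict.items_eq_map_keys _ hnd true, hkeys]
  rw [PySem.List.dedup_eq_ofList]
  refine List.map_congr_left ?_
  intro k _
  have : (l.foldl pvIns (PySem.Dict.empty : PySem.Dict String Bool)).getD k true = true :=
    pv_getD_ins_true l _ k (by simp)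
  simp [this]

-- get? of a Dict.mk on an absent key
theorem pv_get_mk_absent (tags : List (String × String)) (k : String)
    (h : k ∉ tags.map Prod.fst) : (PySem.Dict.mk tags).get? k = none := by
  induction tags with
  | nil => rfl
  | cons p rest ih =>
    obtain ⟨a, v⟩ := p
    simp only [List.map_cons, List.mem_cons, not_or] at h
    rw [PySem.Dict.get?_mk_cons]
    have hne : (a == k) = false := by
      simp only [beq_eq_false_iff_ne, ne_eq]
      exact fun hh => h.1 (by simp [hh])
    rw [hne]
    simpa using ih h.2

-- membership in the truthy-key set of B's scan = truthiness of the dict lookup of A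
theorem pv_truthy_aux (tags : List (String × String)) (s : PySem.Set String) (k : String)
    (h : (tags.map Prod.fst).Nodup) (hk : pvCombinedDict.contains k = true) :
    ((tags.foldl pvTruthyStep s).contains k)
      = (s.contains k || pvTruthy ((PySem.Dict.mk tags).getD k "")) := by
  induction tags generalizing s with
  | nil =>
    have : (PySem.Dict.mk ([] : List (String × String))).getD k "" = "" := by
      rw [PySem.Dict.getD_eq_get?_getD, pv_get_mk_absent [] k (by simp)]; rfl
    simp [this, pvTruthy]
  | cons p rest ih =>
    obtain ⟨a, v⟩ := p
    simp only [List.map_cons, List.nodup_cons] at h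
    rw [List.foldl_cons, ih _ h.2]
    by_cases hak : a = k
    · subst hak
      have habs : (PySem.Dict.mk rest).getD a "" = "" := by
        rw [PySem.Dict.getD_eq_get?_getD, pv_get_mk_absent rest a h.1]; rfl
      have hv : (PySem.Dict.mk ((a, v) :: rest)).getD a "" = v := by
        rw [PySem.Dict.getD_eq_get?_getD, PySem.Dict.get?_mk_cons]; simp
      rw [habs, hv]
      unfold pvTruthyStep
      cases htv : pvTruthy v <;>
        simp [htv, hk, pvTruthy, List.contains_iff_mem, PySem.Set.mem_add]
    · have hne : k ≠ a := fun hh => hak hh.symm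
      have hv : (PySem.Dict.mk ((a, v) :: rest)).getD k "" = (PySem.Dict.mk rest).getD k "" := by
        rw [PySem.Dict.getD_eq_get?_getD, PySem.Dict.get?_mk_cons,
          show (a == k) = false by simp [hak], PySem.Dict.getD_eq_get?_getD]
        simp
      rw [hv]
      have hstep : (pvTruthyStep s (a, v)).contains k = s.contains k := by
        unfold pvTruthyStep
        split
        · simp [List.contains_iff_mem, PySem.Set.mem_add, hne]
        · rfl
      rw [hstep]

-- B's special dict agrees with A's whole-tags dict on the special keys
theorem pv_spec_aux (tags : List (String × String)) (d : PySem.Dict String String) (k : String)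
    (h : (tags.map Prod.fst).Nodup) (hk : pvSpecialKeys.contains k = true) :
    (tags.foldl pvSpecStep d).get? k = ((PySem.Dict.mk tags).get? k).or (d.get? k) := by
  induction tags generalizing d with
  | nil => simp [pv_get_mk_absent [] k (by simp)]
  | cons p rest ih =>
    obtain ⟨a, v⟩ := p
    simp only [List.map_cons, List.nodup_cons] at h
    rw [List.foldl_cons, ih _ h.2]
    by_cases hak : a = k
    · subst hak
      rw [pv_get_mk_absent rest a h.1, PySem.Dict.get?_mk_cons]
      unfold pvSpecStep
      have hk' : a ∈ pvSpecialKeys := by simpa [List.contains_iff_mem] using hk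
      simp [hk', PySem.Dict.get?_insert_self]
    · have hne : k ≠ a := fun hh => hak hh.symm
      have hstep : (pvSpecStep d (a, v)).get? k = d.get? k := by
        unfold pvSpecStep
        split
        · exact PySem.Dict.get?_insert_of_ne _ _ hne
        · rfl
      rw [hstep, PySem.Dict.get?_mk_cons, show (a == k) = false by simp [hak]]
      simp

theorem pv_spec_get (tags : List (String × String)) (k : String)
    (h : (tags.map Prod.fst).Nodup) (hk : pvSpecialKeys.contains k = true) :
    (tags.foldl pvSpecStep PySem.Dict.empty).get? k = (PySem.Dict.mk tags).get? k := by
  rw [pv_spec_aux tags _ k h hk]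
  simp [PySem.Dict.get?_empty]

theorem pv_spec_getD (tags : List (String × String)) (k : String)
    (h : (tags.map Prod.fst).Nodup) (hk : pvSpecialKeys.contains k = true) :
    (tags.foldl pvSpecStep PySem.Dict.empty).getD k "" = (PySem.Dict.mk tags).getD k "" := by
  rw [PySem.Dict.getD_eq_get?_getD, pv_spec_get tags k h hk, PySem.Dict.getD_eq_get?_getD]

-- A's stage rewrites into filtered name-list folds
theorem pv_headfold (L : String) :
    (if L == "playground" then (PySem.Dict.empty : PySem.Dict String Bool).insert "playground" true
     else if L == "dog_park" then (PySem.Dict.empty : PySem.Dict String Bool).insert "dog_park" true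
     else PySem.Dict.empty)
    = (if L == "playground" then ["playground"]
       else if L == "dog_park" then ["dog_park"] else []).foldl pvIns PySem.Dict.empty := by
  cases h1 : (L == "playground") <;> cases h2 : (L == "dog_park") <;>
    simp only [h1, h2, Bool.false_eq_true, if_true, if_false, List.foldl_cons, List.foldl_nil, pvIns]

theorem pv_mapfold (t : PySem.Dict String String) (l : List (String × String))
    (d : PySem.Dict String Bool) :
    l.foldl (fun d p =>
      if (t.getD p.1 "" != "") && ["yes","true","1"].contains (PySem.Str.lower (t.getD p.1 ""))
      then d.insert p.2 true else d) d
    = ((l.filter (fun p =>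
          (t.getD p.1 "" != "") && ["yes","true","1"].contains (PySem.Str.lower (t.getD p.1 "")))).map
        (fun p => p.2)).foldl pvIns d :=
  pv_condfold
    (fun p => (t.getD p.1 "" != "") && ["yes","true","1"].contains (PySem.Str.lower (t.getD p.1 "")))
    (fun p => p.2) l d

theorem pv_sportfold (m : PySem.Dict String String) (l : List String) (d : PySem.Dict String Bool) :
    l.foldl (fun d s0 =>
      if m.contains (PySem.Str.lower (PySem.Str.strip s0))
      then d.insert (m.getD (PySem.Str.lower (PySem.Str.strip s0)) "") true else d) d
    = ((((l.map (fun s0 => PySem.Str.lower (PySem.Str.strip s0))).filter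
          (fun s => m.contains s)).map (fun s => m.getD s "")).foldl pvIns d) := by
  induction l generalizing d with
  | nil => rfl
  | cons s0 rest ih =>
    cases h : m.contains (PySem.Str.lower (PySem.Str.strip s0)) <;>
      simp only [List.foldl_cons, List.map_cons, List.filter_cons, h, Bool.false_eq_true,
        if_true, if_false, ih, pvIns]

-- every key of the combined map is in the combined dict
theorem pv_mem_combined (p : String × String) (hp : p ∈ pvCombinedMap) :
    pvCombinedDict.contains p.1 = true := by
  fin_cases hp <;> rfl

set_option maxHeartbeats 2000000 in
theorem map_amenities_py_spec : Claim_equal_map_amenities_py := by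
  intro tags _ hpre
  unfold Pre_map_amenities_py at hpre
  unfold Spec_map_amenities_py
  simp only [map_amenities_py, map_amenities_py_alt]
  rw [PySem.List.foldl_prod_mk]
  rw [pv_spec_getD tags "leisure" hpre (by decide),
      pv_spec_getD tags "sport" hpre (by decide),
      pv_spec_getD tags "surface" hpre (by decide),
      pv_spec_getD tags "parking" hpre (by decide),
      pv_spec_get tags "highway" hpre (by decide),
      pv_spec_get tags "amenity" hpre (by decide)]
  rw [pv_headfold, pv_mapfold, pv_mapfold, pv_sportfold pvSportMap,
      pv_ifins, pv_ifins, pv_ifins]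
  rw [← List.foldl_append, ← List.foldl_append, ← List.foldl_append, ← List.foldl_append,
      ← List.foldl_append, ← List.foldl_append]
  rw [pv_items_fold]
  have hmid : pvCombinedMap.filter
        (fun p => (tags.foldl pvTruthyStep PySem.Set.empty).contains p.1)
      = pvCombinedMap.filter (fun p =>
          ((PySem.Dict.mk tags).getD p.1 "" != "")
            && ["yes","true","1"].contains (PySem.Str.lower ((PySem.Dict.mk tags).getD p.1 ""))) := by
    refine List.filter_congr ?_
    intro p hp
    rw [pv_truthy_aux tags _ p.1 hpre (pv_mem_combined p hp)]
    rfl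
  rw [hmid]
  rw [show pvCombinedMap = pvTagAmenityMap ++ pvPlaygroundSubTags from rfl,
      List.filter_append, List.map_append]
  simp only [List.append_assoc]
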